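-- pv_equiv track=rewrite | github.com/valinorintelligence/foxnode-aspm | backend/app/services/api_security_service.py | _endpoint_risk_level
-- ===== SOURCE A (Python) =====
-- from typing import Any, Optional
--
-- def _endpoint_risk_level(
--     correlated_findings: list[dict[str, Any]],
--     requires_auth: bool,
-- ) -> str:
--     """Determine risk level for an endpoint based on correlated findings."""
--     if not correlated_findings:
--         return "low" if requires_auth else "medium"
--
--     severities = [f["severity"] for f in correlated_findings]
--     if "critical" in severities:
--         return "critical"
--     if "high" in severities:
--         return "high"
--     if "medium" in severities:
--         return "medium"
--     return "low"
-- ===== SOURCE B (Python) =====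
-- def _endpoint_risk_level(
--     correlated_findings: list,
--     requires_auth: bool,
-- ) -> str:
--     """Determine risk level for an endpoint based on correlated findings."""
--     if not correlated_findings:
--         return "low" if requires_auth else "medium"
--     order = {"low": 1, "medium": 2, "high": 3, "critical": 4}
--     names = ["low", "low", "medium", "high", "critical"]
--     ranks = [order.get(f["severity"], 0) for f in correlated_findings]
--     return names[max(ranks)]
-- ===== Notes on version B (the rewrite author's own statement) =====
-- stated objective: idiomatic
-- what changed: Replaces the priority-ordered repeated membership scans over the severities list with a single rank-and-max pass through an order map, translating the maximum rank back to a level name.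
import Mathlib
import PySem

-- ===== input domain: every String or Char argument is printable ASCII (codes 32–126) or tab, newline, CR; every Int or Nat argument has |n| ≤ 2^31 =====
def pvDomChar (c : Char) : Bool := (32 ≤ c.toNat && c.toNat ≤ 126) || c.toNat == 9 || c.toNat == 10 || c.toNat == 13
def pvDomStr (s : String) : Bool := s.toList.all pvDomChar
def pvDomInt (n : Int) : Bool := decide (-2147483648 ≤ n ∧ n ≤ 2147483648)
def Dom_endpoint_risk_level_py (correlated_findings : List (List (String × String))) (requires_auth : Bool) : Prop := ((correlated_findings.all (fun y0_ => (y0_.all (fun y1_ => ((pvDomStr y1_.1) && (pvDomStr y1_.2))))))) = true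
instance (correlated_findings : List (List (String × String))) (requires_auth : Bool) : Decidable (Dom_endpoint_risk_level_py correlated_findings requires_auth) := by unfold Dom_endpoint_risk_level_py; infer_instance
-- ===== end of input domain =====

-- B replaces A's ordered membership scans with a single rank-and-max pass through an order map (return values proved equal on Pre_; no speed claim).
-- ===== PORT A =====
-- f["severity"]: first-match lookup in the association list; none = KeyError (those inputs are excluded by Pre_, so the "" default is never reached there)
def pvSeverity? (f : List (String × String)) : Option String :=
  (f.find? (fun p => p.1 == "severity")).map (fun p => p.2)

def endpoint_risk_level_py (correlated_findings : List (List (String × String))) (requires_auth : Bool) : String :=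
  if correlated_findings.isEmpty then (if requires_auth then "low" else "medium")
  else
    let severities := correlated_findings.map (fun f => (pvSeverity? f).getD "")
    if severities.contains "critical" then "critical"
    else if severities.contains "high" then "high"
    else if severities.contains "medium" then "medium"
    else "low"

-- ===== PORT B =====
def pvOrder : PySem.Dict String Int :=
  PySem.Dict.ofList [("low", 1), ("medium", 2), ("high", 3), ("critical", 4)]

def pvNames : List String := ["low", "low", "medium", "high", "critical"]

def endpoint_risk_level_py_alt (correlated_findings : List (List (String × String))) (requires_auth : Bool) : String :=
  if correlated_findings.isEmpty then (if requires_auth then "low" else "medium")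
  else
    let ranks := correlated_findings.map (fun f => pvOrder.getD ((pvSeverity? f).getD "") 0)
    match PySem.List.max? ranks (fun x => x) with
    | some m => PySem.List.pyGetD pvNames m ""
    | none => ""

-- ===== PRECONDITION & SPEC =====
-- Pre_ excludes inputs where some finding lacks the "severity" key: there both A and B raise KeyError.
def Pre_endpoint_risk_level_py (correlated_findings : List (List (String × String))) (requires_auth : Bool) : Prop :=
  (correlated_findings.all (fun f => f.any (fun p => p.1 == "severity"))) = true
instance (correlated_findings : List (List (String × String))) (requires_auth : Bool) : Decidable (Pre_endpoint_risk_level_py correlated_findings requires_auth) := by unfold Pre_endpoint_risk_level_py; infer_instance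

def pvWitness_endpoint_risk_level_py : (List (List (String × String))) × Bool :=
  ([[("severity", "high"), ("id", "1")], [("severity", "low")]], false)

def Spec_endpoint_risk_level_py (correlated_findings : List (List (String × String))) (requires_auth : Bool) (out : String) : Prop := out = endpoint_risk_level_py_alt correlated_findings requires_auth
instance (correlated_findings : List (List (String × String))) (requires_auth : Bool) (out : String) : Decidable (Spec_endpoint_risk_level_py correlated_findings requires_auth out) := by unfold Spec_endpoint_risk_level_py; infer_instance

-- ===== CLAIM (what is proved, stated in full; the proofs are below) =====
def Claim_equal_endpoint_risk_level_py : Prop := ∀ (correlated_findings : List (List (String × String))) (requires_auth : Bool), Dom_endpoint_risk_level_py correlated_findings requires_auth → Pre_endpoint_risk_level_py correlated_findings requires_auth → Spec_endpoint_risk_level_py correlated_findings requires_auth (endpoint_risk_level_py correlated_findings requires_auth)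

-- ===== LEMMAS AND PROOFS =====

theorem pvRank_eq (s : String) : pvOrder.getD s 0 =
    if s = "critical" then 4 else if s = "high" then 3 else if s = "medium" then 2
    else if s = "low" then 1 else 0 := by
  have hmk : pvOrder = PySem.Dict.mk [("low", 1), ("medium", 2), ("high", 3), ("critical", 4)] := by decide
  rw [hmk]
  simp only [PySem.Dict.getD_eq_get?_getD, PySem.Dict.get?_mk_cons]
  by_cases h1 : s = "low" <;> by_cases h2 : s = "medium" <;> by_cases h3 : s = "high" <;>
    by_cases h4 : s = "critical" <;> simp_all
  rw [if_neg (fun h => h1 h.symm), if_neg (fun h => h2 h.symm), if_neg (fun h => h3 h.symm),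
    if_neg (fun h => h4 h.symm)]
  rfl

theorem pvRank_nonneg (s : String) : 0 ≤ pvOrder.getD s 0 := by
  rw [pvRank_eq]; split_ifs <;> omega

theorem pvRank_le (s : String) : pvOrder.getD s 0 ≤ 4 := by
  rw [pvRank_eq]; split_ifs <;> omega

theorem pvFoldlMax_mem (l : List Int) (a : Int) : l.foldl max a = a ∨ l.foldl max a ∈ l := by
  induction l generalizing a with
  | nil => left; rfl
  | cons x t ih =>
    simp only [List.foldl_cons, List.mem_cons]
    rcases ih (max a x) with h | h
    · rw [h]
      rcases max_cases a x with ⟨he, _⟩ | ⟨he, _⟩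
      · exact Or.inl he
      · exact Or.inr (Or.inl he)
    · exact Or.inr (Or.inr h)

theorem pvLe_foldlMax (l : List Int) (a b : Int) (h : b ≤ a ∨ b ∈ l) : b ≤ l.foldl max a := by
  induction l generalizing a with
  | nil => simp_all
  | cons x t ih =>
    simp only [List.mem_cons] at h
    simp only [List.foldl_cons]
    rcases h with h | h | h
    · exact ih (max a x) (Or.inl (h.trans (le_max_left a x)))
    · exact ih (max a x) (Or.inl (h ▸ le_max_right a x))
    · exact ih (max a x) (Or.inr h)

-- the rank of a list of severities, as B computes it
theorem pvMain (ss : List String) (hne : ss ≠ []) :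
    (if ss.contains "critical" then "critical"
     else if ss.contains "high" then "high"
     else if ss.contains "medium" then "medium"
     else "low")
    = match PySem.List.max? (ss.map (fun s => pvOrder.getD s 0)) (fun x => x) with
      | some m => PySem.List.pyGetD pvNames m ""
      | none => "" := by
  obtain ⟨s0, tl, rfl⟩ := List.exists_cons_of_ne_nil hne
  rw [List.map_cons, PySem.List.max?_id_cons]
  set M := (tl.map (fun s => pvOrder.getD s 0)).foldl max (pvOrder.getD s0 0) with hM
  have hmemM : ∀ s, s ∈ s0 :: tl → pvOrder.getD s 0 ≤ M := by
    intro s hs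
    rcases List.mem_cons.mp hs with rfl | hs
    · exact pvLe_foldlMax _ _ _ (Or.inl le_rfl)
    · exact pvLe_foldlMax _ _ _ (Or.inr (List.mem_map_of_mem hs))
  have hattain : ∃ s ∈ s0 :: tl, M = pvOrder.getD s 0 := by
    rcases pvFoldlMax_mem (tl.map (fun s => pvOrder.getD s 0)) (pvOrder.getD s0 0) with h | h
    · exact ⟨s0, List.mem_cons_self, h⟩
    · obtain ⟨s, hs, he⟩ := List.mem_map.mp h
      exact ⟨s, List.mem_cons_of_mem _ hs, he.symm⟩
  obtain ⟨sM, hsM, heM⟩ := hattain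
  have hMle : M ≤ 4 := heM ▸ pvRank_le sM
  have hMge : 0 ≤ M := heM ▸ pvRank_nonneg sM
  by_cases hc : "critical" ∈ s0 :: tl
  · have h4 : M = 4 := le_antisymm hMle (by have := hmemM _ hc; rw [pvRank_eq] at this; simpa using this)
    simp [List.contains_eq_mem, hc, h4, pvNames, PySem.List.pyGetD]
  · have hMne4 : M ≠ 4 := by
      intro h; rw [heM, pvRank_eq] at h
      split_ifs at h with h1 h2 h3 h4
      · exact hc (h1 ▸ hsM)
      all_goals omega
    by_cases hh : "high" ∈ s0 :: tl
    · have h3 : M = 3 := by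
        have := hmemM _ hh; rw [pvRank_eq] at this; simp at this; omega
      simp [List.contains_eq_mem, hc, hh, h3, pvNames, PySem.List.pyGetD]
    · have hMne3 : M ≠ 3 := by
        intro h; rw [heM, pvRank_eq] at h
        split_ifs at h with h1 h2 h3 h4
        · omega
        · exact hh (h2 ▸ hsM)
        all_goals omega
      by_cases hm : "medium" ∈ s0 :: tl
      · have h2 : M = 2 := by
          have := hmemM _ hm; rw [pvRank_eq] at this; simp at this; omega
        simp [List.contains_eq_mem, hc, hh, hm, h2, pvNames, PySem.List.pyGetD]
      · have hMne2 : M ≠ 2 := by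
          intro h; rw [heM, pvRank_eq] at h
          split_ifs at h with h1 h2 h3 h4
          · omega
          · omega
          · exact hm (h3 ▸ hsM)
          all_goals omega
        have : M = 0 ∨ M = 1 := by omega
        rcases this with h | h <;>
          simp [List.contains_eq_mem, hc, hh, hm, h, pvNames, PySem.List.pyGetD]

-- ===== VERDICT (by name: the statement is the Claim_ definition above) =====
theorem endpoint_risk_level_py_spec : Claim_equal_endpoint_risk_level_py := by
  intro cf ra _dom _pre
  unfold Spec_endpoint_risk_level_py endpoint_risk_level_py endpoint_risk_level_py_alt
  by_cases he : cf.isEmpty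
  · simp [he]
  · simp only [he, if_false]
    have hne : cf.map (fun f => (pvSeverity? f).getD "") ≠ [] := by
      simp [List.isEmpty_iff] at he; simp [he]
    have := pvMain (cf.map (fun f => (pvSeverity? f).getD "")) hne
    simpa [List.map_map, Function.comp] using this
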